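-- pv_equiv track=rewrite | github.com/mauricio-fernandez-l/MyMath | src/my_math/game.py | _calculate_groups
-- ===== SOURCE A (Python) =====
-- def _calculate_groups(count: int) -> list[int]:
--     """Calculate groups for displaying images.
--
--     Groups help children understand number composition:
--     - Even numbers: groups of 10, 4, 2
--     - Odd numbers: after 10s, use 3+2 patterns (e.g., 5=3+2, 7=4+3, 9=4+3+2)
--     """
--     groups = []
--     remaining = count
--
--     # First, take as many 10s as possible
--     while remaining >= 10:
--         groups.append(10)
--         remaining -= 10
--
--     # Handle the remainder
--     if remaining == 0:
--         pass
--     elif remaining % 2 == 0:  # Even remainder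
--         # Use groups of 4 and 2
--         while remaining >= 4:
--             groups.append(4)
--             remaining -= 4
--         while remaining >= 2:
--             groups.append(2)
--             remaining -= 2
--     else:  # Odd remainder (1, 3, 5, 7, 9)
--         # Special patterns to avoid 1 and show composition
--         if remaining == 1:
--             groups.append(1)
--         elif remaining == 3:
--             groups.append(3)
--         elif remaining == 5:
--             groups.append(3)
--             groups.append(2)
--         elif remaining == 7:
--             groups.append(4)
--             groups.append(3)
--         elif remaining == 9:
--             groups.append(4)
--             groups.append(3)
--             groups.append(2)
--
--     return groups
-- ===== SOURCE B (Python) =====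
-- _TABLE = {0: [], 1: [1], 2: [2], 3: [3], 4: [4],
--           5: [3, 2], 6: [4, 2], 7: [4, 3], 8: [4, 4], 9: [4, 3, 2]}
--
--
-- def _calculate_groups(count: int) -> list[int]:
--     if count < 0:
--         return []
--     return [10] * (count // 10) + list(_TABLE[count % 10])
-- ===== Notes on version B (the rewrite author's own statement) =====
-- stated objective: simpler
-- what changed: Replaces A's while-loops and if-chain with a closed form: floor-division gives the number of tens and a lookup table gives the remainder's groups (negative counts return [] up front, matching A's no-loop behaviour).
import Mathlib
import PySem

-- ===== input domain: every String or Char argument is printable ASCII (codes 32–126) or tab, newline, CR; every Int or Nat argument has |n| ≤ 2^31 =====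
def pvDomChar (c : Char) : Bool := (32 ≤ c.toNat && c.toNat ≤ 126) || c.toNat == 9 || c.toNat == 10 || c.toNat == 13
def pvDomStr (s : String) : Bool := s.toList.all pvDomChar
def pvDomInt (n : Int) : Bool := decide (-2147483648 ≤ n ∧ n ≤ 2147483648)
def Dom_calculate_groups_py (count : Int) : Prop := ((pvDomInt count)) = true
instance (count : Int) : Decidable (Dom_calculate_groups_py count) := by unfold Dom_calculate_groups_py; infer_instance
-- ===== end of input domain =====

-- B replaces A's while-loops and if-chain by a closed form: count//10 tens plus a table entry for count%10 (simpler).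


-- ===== PORT A =====
-- while remaining >= 10: groups.append(10); remaining -= 10
def pyTens (groups : List Int) (remaining : Int) : List Int × Int :=
  if remaining ≥ 10 then pyTens (groups ++ [10]) (remaining - 10) else (groups, remaining)
termination_by remaining.toNat
decreasing_by omega

-- while remaining >= 4: groups.append(4); remaining -= 4
def pyFours (groups : List Int) (remaining : Int) : List Int × Int :=
  if remaining ≥ 4 then pyFours (groups ++ [4]) (remaining - 4) else (groups, remaining)
termination_by remaining.toNat
decreasing_by omega

-- while remaining >= 2: groups.append(2); remaining -= 2
def pyTwos (groups : List Int) (remaining : Int) : List Int × Int :=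
  if remaining ≥ 2 then pyTwos (groups ++ [2]) (remaining - 2) else (groups, remaining)
termination_by remaining.toNat
decreasing_by omega

def calculate_groups_py (count : Int) : List Int :=
  let p := pyTens [] count
  let groups := p.1
  let remaining := p.2
  if remaining = 0 then groups
  else if PySem.Int.mod remaining 2 = 0 then
    let q := pyFours groups remaining
    (pyTwos q.1 q.2).1
  else
    if remaining = 1 then groups ++ [1]
    else if remaining = 3 then groups ++ [3]
    else if remaining = 5 then groups ++ [3, 2]
    else if remaining = 7 then groups ++ [4, 3]
    else if remaining = 9 then groups ++ [4, 3, 2]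
    else groups

-- ===== PORT B =====
-- _TABLE[r] for r = count % 10 (0..9); ported as a lookup function
def pvGroupTable (r : Int) : List Int :=
  if r = 1 then [1] else if r = 2 then [2] else if r = 3 then [3]
  else if r = 4 then [4] else if r = 5 then [3, 2] else if r = 6 then [4, 2]
  else if r = 7 then [4, 3] else if r = 8 then [4, 4] else if r = 9 then [4, 3, 2]
  else []

def calculate_groups_py_alt (count : Int) : List Int :=
  if count < 0 then []
  else List.replicate (PySem.Int.floordiv count 10).toNat 10 ++ pvGroupTable (PySem.Int.mod count 10)

-- ===== PRECONDITION & SPEC =====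
def Spec_calculate_groups_py (count : Int) (out : List Int) : Prop := out = calculate_groups_py_alt count
instance (count : Int) (out : List Int) : Decidable (Spec_calculate_groups_py count out) := by unfold Spec_calculate_groups_py; infer_instance

-- ===== CLAIM (what is proved, stated in full; the proofs are below) =====
def Claim_equal_calculate_groups_py : Prop := ∀ (count : Int), Dom_calculate_groups_py count → Spec_calculate_groups_py count (calculate_groups_py count)

-- ===== LEMMAS AND PROOFS =====

theorem pyTens_lt (g : List Int) (r : Int) (h : r < 10) : pyTens g r = (g, r) := by
  rw [pyTens, if_neg (by omega)]

theorem pyTens_ge (g : List Int) (r : Int) (h : 10 ≤ r) :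
    pyTens g r = pyTens (g ++ [10]) (r - 10) := by
  rw [pyTens]; rw [if_pos h]

theorem pyFours_lt (g : List Int) (r : Int) (h : r < 4) : pyFours g r = (g, r) := by
  rw [pyFours, if_neg (by omega)]

theorem pyFours_ge (g : List Int) (r : Int) (h : 4 ≤ r) :
    pyFours g r = pyFours (g ++ [4]) (r - 4) := by
  rw [pyFours]; rw [if_pos h]

theorem pyTwos_lt (g : List Int) (r : Int) (h : r < 2) : pyTwos g r = (g, r) := by
  rw [pyTwos, if_neg (by omega)]

theorem pyTwos_ge (g : List Int) (r : Int) (h : 2 ≤ r) :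
    pyTwos g r = pyTwos (g ++ [2]) (r - 2) := by
  rw [pyTwos]; rw [if_pos h]

-- Accumulator lemmas: the three loops only append to the right of `groups`.
theorem pyTens_acc : ∀ (m : Nat) (r : Int), r.toNat = m → ∀ g : List Int,
    pyTens g r = (g ++ (pyTens [] r).1, (pyTens [] r).2) := by
  intro m
  induction m using Nat.strong_induction_on with
  | _ m ih =>
    intro r hr g
    by_cases h : 10 ≤ r
    · rw [pyTens_ge g r h, pyTens_ge [] r h,
          ih (r - 10).toNat (by omega) _ rfl (g ++ [10]),
          ih (r - 10).toNat (by omega) _ rfl ([] ++ [10])]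
      simp
    · rw [pyTens_lt g r (by omega), pyTens_lt [] r (by omega)]
      simp

theorem pyFours_acc : ∀ (m : Nat) (r : Int), r.toNat = m → ∀ g : List Int,
    pyFours g r = (g ++ (pyFours [] r).1, (pyFours [] r).2) := by
  intro m
  induction m using Nat.strong_induction_on with
  | _ m ih =>
    intro r hr g
    by_cases h : 4 ≤ r
    · rw [pyFours_ge g r h, pyFours_ge [] r h,
          ih (r - 4).toNat (by omega) _ rfl (g ++ [4]),
          ih (r - 4).toNat (by omega) _ rfl ([] ++ [4])]
      simp
    · rw [pyFours_lt g r (by omega), pyFours_lt [] r (by omega)]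
      simp

theorem pyTwos_acc : ∀ (m : Nat) (r : Int), r.toNat = m → ∀ g : List Int,
    pyTwos g r = (g ++ (pyTwos [] r).1, (pyTwos [] r).2) := by
  intro m
  induction m using Nat.strong_induction_on with
  | _ m ih =>
    intro r hr g
    by_cases h : 2 ≤ r
    · rw [pyTwos_ge g r h, pyTwos_ge [] r h,
          ih (r - 2).toNat (by omega) _ rfl (g ++ [2]),
          ih (r - 2).toNat (by omega) _ rfl ([] ++ [2])]
      simp
    · rw [pyTwos_lt g r (by omega), pyTwos_lt [] r (by omega)]
      simp

-- Peeling one ten off A.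
theorem A_step (count : Int) (h : count ≥ 10) :
    calculate_groups_py count = 10 :: calculate_groups_py (count - 10) := by
  unfold calculate_groups_py
  rw [pyTens_ge [] count h, pyTens_acc (count - 10).toNat _ rfl ([] ++ [10])]
  simp only [List.nil_append, List.singleton_append]
  generalize pyTens [] (count - 10) = p
  obtain ⟨gs, r⟩ := p
  simp only
  split
  · rfl
  · split
    · rw [pyFours_acc r.toNat r rfl (10 :: gs), pyFours_acc r.toNat r rfl gs]
      generalize pyFours [] r = q
      obtain ⟨gf, rf⟩ := q
      simp only
      rw [pyTwos_acc rf.toNat rf rfl, pyTwos_acc rf.toNat rf rfl (gs ++ gf)]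
      simp
    · split_ifs <;> simp

-- Peeling one ten off B.
theorem B_step (count : Int) (h : count ≥ 10) :
    calculate_groups_py_alt count = 10 :: calculate_groups_py_alt (count - 10) := by
  unfold calculate_groups_py_alt
  rw [if_neg (by omega), if_neg (by omega)]
  have hd : PySem.Int.floordiv count 10 = PySem.Int.floordiv (count - 10) 10 + 1 := by
    rw [PySem.Int.floordiv_eq_ediv_of_pos (by omega), PySem.Int.floordiv_eq_ediv_of_pos (by omega)]
    omega
  have hm : PySem.Int.mod count 10 = PySem.Int.mod (count - 10) 10 := by
    rw [PySem.Int.mod_eq_emod_of_pos (by omega), PySem.Int.mod_eq_emod_of_pos (by omega)]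
    omega
  have hnn : 0 ≤ PySem.Int.floordiv (count - 10) 10 := by
    rw [PySem.Int.floordiv_eq_ediv_of_pos (by omega)]; omega
  rw [hd, hm]
  have ht : (PySem.Int.floordiv (count - 10) 10 + 1).toNat
        = (PySem.Int.floordiv (count - 10) 10).toNat + 1 := by omega
  rw [ht, List.replicate_succ]
  simp

-- Both return [] for negative counts.
theorem A_neg (count : Int) (h : count < 0) : calculate_groups_py count = [] := by
  unfold calculate_groups_py
  rw [pyTens_lt [] count (by omega)]
  simp only
  rw [if_neg (by omega)]
  split
  · rw [pyFours_lt [] count (by omega)]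
    simp only
    rw [pyTwos_lt [] count (by omega)]
  · split_ifs <;> first | rfl | (exfalso; omega)

theorem AB_eq : ∀ (m : Nat) (count : Int), count.toNat = m →
    calculate_groups_py count = calculate_groups_py_alt count := by
  intro m
  induction m using Nat.strong_induction_on with
  | _ m ih =>
    intro count hm
    by_cases h10 : count ≥ 10
    · rw [A_step count h10, B_step count h10,
          ih (count - 10).toNat (by omega) _ rfl]
    · by_cases hneg : count < 0
      · rw [A_neg count hneg]
        unfold calculate_groups_py_alt
        rw [if_pos hneg]
      · interval_cases count <;>
          norm_num [calculate_groups_py, calculate_groups_py_alt, pvGroupTable,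
            pyTens_lt, pyFours_lt, pyFours_ge, pyTwos_lt, pyTwos_ge,
            PySem.Int.mod, PySem.Int.floordiv] <;> decide

-- ===== VERDICT (by name: the statement is the Claim_ definition above) =====
theorem calculate_groups_py_spec : Claim_equal_calculate_groups_py := by
  intro count _
  exact AB_eq count.toNat count rfl
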